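-- pv_equiv track=rewrite | github.com/yps1978/yps1978 | dev/greedy/slow_sums.py | getTotalTime
-- ===== SOURCE A (Python) =====
-- def getTotalTime(arr):
--     sorted_arr = sorted(arr)
--
--     penalties = 0
--     i = len(arr) - 1
--     last_penalty = 0
--
--     while i > 0:
--         if penalties == 0:
--             last_penalty = sorted_arr[i] + sorted_arr[i - 1]
--         else:
--             last_penalty += sorted_arr[i - 1]
--
--         penalties += last_penalty
--
--         i -= 1
--
--     return penalties
-- ===== SOURCE B (Python) =====
-- def getTotalTime(arr):
--     if not arr:
--         return 0
--     s = sorted(arr)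
--     return sum((j + 1) * x for j, x in enumerate(s)) - s[-1]
-- ===== Notes on version B (the rewrite author's own statement) =====
-- stated objective: simpler
-- what changed: Replaces A's stateful top-down while loop (running last_penalty/penalties suffix-sum accumulation with a `penalties == 0` first-iteration flag) by a closed-form single ascending pass: sum of (j+1)*s[j] over the sorted array minus its last element.
-- intended difference: On inputs where A's running penalties total hits exactly 0 after at least one loop iteration while the remaining sorted suffix sums nonzero (only possible with negative elements), A's `penalties == 0` first-iteration flag misfires and resets last_penalty, returning a wrong total (e.g. -5 on [-3,-2,2]); B returns the intended sum of suffix sums (-3 there). — e.g. on getTotalTime([-3, -2, 2]): A returns -5, B returns -3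
import Mathlib
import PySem

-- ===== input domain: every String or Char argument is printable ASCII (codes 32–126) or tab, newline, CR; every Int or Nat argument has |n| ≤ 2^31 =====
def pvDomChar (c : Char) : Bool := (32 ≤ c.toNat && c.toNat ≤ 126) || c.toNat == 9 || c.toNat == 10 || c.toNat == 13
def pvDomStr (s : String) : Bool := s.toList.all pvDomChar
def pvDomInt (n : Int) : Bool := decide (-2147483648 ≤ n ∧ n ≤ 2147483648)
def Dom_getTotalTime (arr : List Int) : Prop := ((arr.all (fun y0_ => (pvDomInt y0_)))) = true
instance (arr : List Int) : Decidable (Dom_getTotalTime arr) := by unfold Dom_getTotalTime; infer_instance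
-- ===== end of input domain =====

-- B replaces A's stateful top-down suffix-sum loop with a closed-form index-weighted
-- sum over the sorted array (objective: simpler); on the exceptional D_ inputs where A's
-- first-iteration flag `penalties == 0` misfires, B returns the intended total instead.

-- ===== PORT A =====
-- the while loop of A: counter i counts down to 0; sorted_arr[i] / sorted_arr[i-1] are
-- always in range when reached (1 ≤ i ≤ len-1), so `.getD 0` on pyGet? is exact here
def getTotalTimeLoop (s : List Int) : Nat → Int → Int → Int
  | 0, penalties, _ => penalties
  | i + 1, penalties, last_penalty =>
    let lp : Int :=
      if penalties = 0 then
        (PySem.List.pyGet? s ((i : Int) + 1)).getD 0 + (PySem.List.pyGet? s (i : Int)).getD 0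
      else
        last_penalty + (PySem.List.pyGet? s (i : Int)).getD 0
    getTotalTimeLoop s i (penalties + lp) lp

def getTotalTime (arr : List Int) : Int :=
  let sorted_arr := PySem.List.sorted arr (fun x => x)
  -- i = len(arr) - 1; for arr = [] Python starts at i = -1 and the loop body never runs,
  -- exactly as the Nat-subtraction start 0 does here
  getTotalTimeLoop sorted_arr (arr.length - 1) 0 0

-- ===== PORT B =====
def getTotalTime_alt (arr : List Int) : Int :=
  if arr = [] then 0
  else
    let s := PySem.List.sorted arr (fun x => x)
    (PySem.List.enumerate s).foldl (fun acc jx => acc + (jx.1 + 1) * jx.2) 0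
      - (PySem.List.pyGet? s (-1)).getD 0

-- ===== PRECONDITION & SPEC =====
-- one ascending scan over a list t computing (pvSuf t 0, pvRun t 0, flag),
-- where the flag says: some later running total pvRun t i (1 <= i) is exactly 0
-- while the remaining suffix sum pvSuf t (i+1) is nonzero (pvScan_spec below)
def pvScan : List Int → Int × Int × Bool
  | [] => (0, 0, false)
  | x :: u =>
    let r := pvScan u
    (x + r.1,
     (match u with | [] => 0 | _ :: _ => x + r.1 + r.2.1),
     r.2.2 || (match u with
               | [] => false
               | y :: _ => decide (r.2.1 = 0) && decide (r.1 - y ≠ 0)))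

-- On inputs whose running total of suffix sums over the sorted array hits exactly 0
-- after at least one loop iteration while the remaining suffix still sums nonzero
-- (possible only with negative elements), A's first-iteration flag `penalties == 0`
-- misfires and resets last_penalty, returning a wrong total (e.g. -5 on [-3, -2, 2]);
-- B returns the intended sum of suffix sums (-3 there), which is what the greedy
-- total-time accumulation means.
def D_getTotalTime (arr : List Int) : Prop :=
  (pvScan (PySem.List.sorted arr (fun x => x))).2.2 = true
instance (arr : List Int) : Decidable (D_getTotalTime arr) := by
  unfold D_getTotalTime; infer_instance

def Spec_getTotalTime (arr : List Int) (out : Int) : Prop :=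
  ¬ D_getTotalTime arr → out = getTotalTime_alt arr
instance (arr : List Int) (out : Int) : Decidable (Spec_getTotalTime arr out) := by
  unfold Spec_getTotalTime; infer_instance

def pvDiffWitness_getTotalTime : List Int := [-3, -2, 2]
def pvDiffWitnessOut_getTotalTime : Int × Int := (-5, -3)

-- ===== CLAIM (what is proved, stated in full; the proofs are below) =====
def Claim_unchanged_getTotalTime : Prop :=
  ∀ (arr : List Int), Dom_getTotalTime arr → Spec_getTotalTime arr (getTotalTime arr)
def Claim_changed_getTotalTime : Prop :=
  Dom_getTotalTime (pvDiffWitness_getTotalTime) ∧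
  D_getTotalTime (pvDiffWitness_getTotalTime) ∧
  getTotalTime (pvDiffWitness_getTotalTime) = pvDiffWitnessOut_getTotalTime.1 ∧
  getTotalTime_alt (pvDiffWitness_getTotalTime) = pvDiffWitnessOut_getTotalTime.2 ∧
  pvDiffWitnessOut_getTotalTime.1 ≠ pvDiffWitnessOut_getTotalTime.2
def Claim_exact_getTotalTime : Prop :=
  ∀ (arr : List Int), Dom_getTotalTime arr → D_getTotalTime arr →
    getTotalTime arr ≠ getTotalTime_alt arr

-- ===== LEMMAS AND PROOFS =====

-- sum of the suffix s[k:] of the sorted array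
def pvSuf (s : List Int) (k : Nat) : Int := (s.drop k).sum
-- the (intended) running total of A after it has processed counters len-1, …, i+1:
-- the sum of the suffix sums s[k:] for k = i, …, len-2
def pvRun (s : List Int) (i : Nat) : Int :=
  ((List.range' i (s.length - 1 - i)).map (pvSuf s)).sum

lemma pvSuf_succ (s : List Int) (k : Nat) (h : k < s.length) :
    pvSuf s k = s.getD k 0 + pvSuf s (k + 1) := by
  unfold pvSuf
  rw [List.drop_eq_getElem_cons h, List.sum_cons, List.getD_eq_getElem?_getD,
    List.getElem?_eq_getElem h, Option.getD_some]

lemma pvSuf_of_ge (s : List Int) (k : Nat) (h : s.length ≤ k) : pvSuf s k = 0 := by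
  simp [pvSuf, List.drop_eq_nil_iff.mpr h]

lemma pvRun_succ (s : List Int) (i : Nat) (h : i + 1 ≤ s.length - 1) :
    pvRun s i = pvSuf s i + pvRun s (i + 1) := by
  have hc : s.length - 1 - i = (s.length - 1 - (i + 1)) + 1 := by omega
  simp [pvRun, hc, List.range'_succ]

lemma pvRun_top (s : List Int) (i : Nat) (h : s.length - 1 ≤ i) : pvRun s i = 0 := by
  have hc : s.length - 1 - i = 0 := by omega
  simp [pvRun, hc]

lemma pvSuf_cons_zero (x : Int) (u : List Int) : pvSuf (x :: u) 0 = x + pvSuf u 0 := by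
  simp [pvSuf]

lemma pvSuf_cons_succ (x : Int) (u : List Int) (k : Nat) :
    pvSuf (x :: u) (k + 1) = pvSuf u k := rfl

lemma pvRun_cons_succ (x : Int) (u : List Int) (i : Nat) :
    pvRun (x :: u) (i + 1) = pvRun u i := by
  unfold pvRun
  have hc : (x :: u).length - 1 - (i + 1) = u.length - 1 - i := by
    simp [List.length_cons]; omega
  rw [hc]
  have h1 : List.range' (i + 1) (u.length - 1 - i) =
      (List.range (u.length - 1 - i)).map ((i + 1) + ·) := List.range'_eq_map_range
  have h0 : List.range' i (u.length - 1 - i) =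
      (List.range (u.length - 1 - i)).map (i + ·) := List.range'_eq_map_range
  rw [h1, h0, List.map_map, List.map_map]
  congr 1
  apply List.map_congr_left
  intro k _
  show pvSuf (x :: u) (i + 1 + k) = pvSuf u (i + k)
  have : i + 1 + k = (i + k) + 1 := by omega
  rw [this, pvSuf_cons_succ]

-- the scan computes (pvSuf t 0, pvRun t 0, the D-flag)
lemma pvScan_spec : ∀ (t : List Int),
    (pvScan t).1 = pvSuf t 0 ∧ (pvScan t).2.1 = pvRun t 0 ∧
    ((pvScan t).2.2 = true ↔
      ∃ i ∈ Finset.Icc 1 (t.length - 1), pvRun t i = 0 ∧ pvSuf t (i + 1) ≠ 0) := by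
  intro t
  induction t with
  | nil =>
    refine ⟨rfl, rfl, ?_⟩
    simp [pvScan]
  | cons x u ih =>
    obtain ⟨h1, h2, h3⟩ := ih
    refine ⟨?_, ?_, ?_⟩
    · show x + (pvScan u).1 = pvSuf (x :: u) 0
      rw [h1, pvSuf_cons_zero]
    · cases u with
      | nil =>
        show (0 : Int) = pvRun [x] 0
        rw [pvRun_top _ _ (by simp)]
      | cons y v =>
        show x + (pvScan (y :: v)).1 + (pvScan (y :: v)).2.1 = pvRun (x :: y :: v) 0
        rw [h1, h2, pvRun_succ (x :: y :: v) 0 (by simp only [List.length_cons]; omega),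
          pvRun_cons_succ, pvSuf_cons_zero x (y :: v), pvSuf_cons_zero y v]
    · cases u with
      | nil =>
        show ((pvScan [x]).2.2 = true ↔ _)
        constructor
        · intro h; exact absurd h (by simp [pvScan])
        · rintro ⟨i, hi, -, -⟩
          simp at hi
      | cons y v =>
        show ((pvScan (y :: v)).2.2
            || (decide ((pvScan (y :: v)).2.1 = 0) && decide ((pvScan (y :: v)).1 - y ≠ 0))) = true ↔ _
        rw [Bool.or_eq_true, Bool.and_eq_true, decide_eq_true_iff, decide_eq_true_iff,
          h3, h1, h2]
        have hy : pvSuf (y :: v) 0 - y = pvSuf (y :: v) 1 := by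
          rw [pvSuf_succ (y :: v) 0 (by simp)]
          simp [List.getD]
        rw [hy]
        constructor
        · rintro (⟨j, hj, hQ, hS⟩ | ⟨hQ, hS⟩)
          · rw [Finset.mem_Icc] at hj
            refine ⟨j + 1, Finset.mem_Icc.mpr ⟨by omega,
              by simp only [List.length_cons] at hj ⊢; omega⟩, ?_, ?_⟩
            · rw [pvRun_cons_succ]; exact hQ
            · rw [pvSuf_cons_succ]; exact hS
          · exact ⟨1, Finset.mem_Icc.mpr ⟨le_refl 1, by simp only [List.length_cons]; omega⟩,
              by rw [pvRun_cons_succ]; exact hQ, by rw [pvSuf_cons_succ]; exact hS⟩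
        · rintro ⟨i, hi, hQ, hS⟩
          rw [Finset.mem_Icc] at hi
          obtain ⟨hi1, hi2⟩ := hi
          match i, hi1 with
          | 1, _ =>
            right
            exact ⟨by rw [← pvRun_cons_succ x (y :: v) 0]; exact hQ,
              by rw [← pvSuf_cons_succ x (y :: v) 1]; exact hS⟩
          | (j + 2), _ =>
            left
            refine ⟨j + 1, Finset.mem_Icc.mpr ⟨by omega,
              by simp only [List.length_cons] at hi2 ⊢; omega⟩, ?_, ?_⟩
            · rw [← pvRun_cons_succ x (y :: v) (j + 1)]; exact hQ
            · rw [← pvSuf_cons_succ x (y :: v) (j + 2)]; exact hS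

-- the loop invariant: entering the loop with counter i, penalties = pvRun s i,
-- and (unless penalties = 0, when it is overwritten) last_penalty = pvSuf s i
lemma loop_eq_run (s : List Int)
    (hD : ∀ j, 1 ≤ j → pvRun s j = 0 → pvSuf s (j + 1) = 0) :
    ∀ (i : Nat), i ≤ s.length - 1 → ∀ (p last : Int),
      p = pvRun s i → (p ≠ 0 → last = pvSuf s i) →
      getTotalTimeLoop s i p last = pvRun s 0 := by
  intro i
  induction i with
  | zero => intro _ p last hp _; simpa [getTotalTimeLoop] using hp
  | succ i ih =>
    intro hi p last hp hlast
    have hi1 : i + 1 < s.length := by omega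
    have hi0 : i < s.length := by omega
    have hget : (PySem.List.pyGet? s ((i : Int) + 1)).getD 0 = s.getD (i + 1) 0 := by
      have hc : ((i : Int) + 1) = ((i + 1 : Nat) : Int) := by push_cast; ring
      rw [hc, PySem.List.pyGet?_natCast, ← List.getD_eq_getElem?_getD]
    have hget0 : (PySem.List.pyGet? s ((i : Int))).getD 0 = s.getD i 0 := by
      rw [PySem.List.pyGet?_natCast, ← List.getD_eq_getElem?_getD]
    have hstep : pvRun s i = pvSuf s i + pvRun s (i + 1) := pvRun_succ s i hi
    show getTotalTimeLoop s (i + 1) p last = pvRun s 0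
    rw [getTotalTimeLoop]
    by_cases hz : p = 0
    · have hQ : pvRun s (i + 1) = 0 := by rw [← hp, hz]
      have hs2 : pvSuf s (i + 2) = 0 := hD (i + 1) (by omega) hQ
      have hlp : s.getD (i + 1) 0 + s.getD i 0 = pvSuf s i := by
        have e1 := pvSuf_succ s i hi0
        have e2 := pvSuf_succ s (i + 1) hi1
        linarith [hs2]
      simp only [hz, reduceIte, hget, hget0]
      apply ih (by omega)
      · rw [hlp, hstep, hQ]; ring
      · intro _; rw [hlp]
    · have hlast' : last = pvSuf s (i + 1) := hlast hz
      have hlp : last + s.getD i 0 = pvSuf s i := by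
        have e1 := pvSuf_succ s i hi0
        linarith [hlast']
      simp only [if_neg hz, hget0]
      apply ih (by omega)
      · rw [hlp, hp, hstep]; ring
      · intro _; rw [hlp]

lemma A_eq_run (arr : List Int)
    (hD : ∀ j, 1 ≤ j → pvRun (PySem.List.sorted arr (fun x => x)) j = 0 →
          pvSuf (PySem.List.sorted arr (fun x => x)) (j + 1) = 0) :
    getTotalTime arr = pvRun (PySem.List.sorted arr (fun x => x)) 0 := by
  have hl : (PySem.List.sorted arr (fun x => x)).length = arr.length :=
    PySem.List.length_sorted ..
  unfold getTotalTime
  apply loop_eq_run _ hD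
  · omega
  · rw [pvRun_top _ _ (by omega)]
  · intro h; exact absurd rfl h

-- weighted-sum side: Σ (j+1+st)·s[j] over enumerate s st
def pvWs (s : List Int) (st : Int) : Int :=
  ((PySem.List.enumerate s st).map (fun jx => (jx.1 + 1) * jx.2)).sum

lemma pvWs_shift (s : List Int) : ∀ (st : Int), pvWs s st = pvWs s 0 + st * s.sum := by
  induction s with
  | nil => intro st; simp [pvWs, PySem.List.enumerate]
  | cons x t ih =>
    intro st
    simp only [pvWs, PySem.List.enumerate_cons, List.map_cons, List.sum_cons, zero_add]
    have h1 := ih (st + 1)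
    have h2 := ih 1
    simp only [pvWs] at h1 h2
    rw [h1, h2]
    ring

-- Σ_{k<|s|} suffix-sum s[k:] equals the index-weighted sum Σ (j+1)·s[j]
lemma sum_suf_eq_ws (s : List Int) :
    ((List.range' 0 s.length).map (pvSuf s)).sum = pvWs s 0 := by
  induction s with
  | nil => simp [pvWs, PySem.List.enumerate]
  | cons x t ih =>
    have hshift : ((List.range' 1 t.length).map (pvSuf (x :: t))).sum
        = ((List.range' 0 t.length).map (pvSuf t)).sum := by
      have h1 : List.range' 1 t.length = (List.range t.length).map (1 + ·) :=
        List.range'_eq_map_range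
      have h0 : List.range' 0 t.length = (List.range t.length).map (0 + ·) :=
        List.range'_eq_map_range
      simp only [h1, h0, List.map_map]
      congr 1
      apply List.map_congr_left
      intro k _
      simp only [Function.comp, pvSuf, Nat.add_comm 1 k, List.drop_succ_cons, zero_add]
    have hcons : List.range' 0 (t.length + 1) = 0 :: List.range' 1 t.length :=
      List.range'_succ ..
    simp only [List.length_cons, hcons, List.map_cons, List.sum_cons, hshift, ih]
    have hw := pvWs_shift t 1
    simp only [pvWs, PySem.List.enumerate_cons, List.map_cons, List.sum_cons, zero_add]
    simp only [pvWs] at hw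
    rw [hw]
    have : pvSuf (x :: t) 0 = x + t.sum := by simp [pvSuf]
    rw [this]
    ring

lemma B_eq_run (arr : List Int) :
    getTotalTime_alt arr = pvRun (PySem.List.sorted arr (fun x => x)) 0 := by
  by_cases hnil : arr = []
  · simp [getTotalTime_alt, hnil, pvRun, PySem.List.sorted]
  · simp only [getTotalTime_alt, if_neg hnil]
    set s := PySem.List.sorted arr (fun x => x) with hs
    have hsnil : s ≠ [] := by
      rw [hs]; intro h; exact hnil ((PySem.List.sorted_eq_nil_iff ..).mp h)
    have hlen : 1 ≤ s.length := List.length_pos_iff.mpr hsnil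
    have hfold : (PySem.List.enumerate s).foldl (fun acc jx => acc + (jx.1 + 1) * jx.2) 0
        = pvWs s 0 := by
      simpa [pvWs] using
        PySem.List.foldl_add (PySem.List.enumerate s) (fun jx => (jx.1 + 1) * jx.2) 0
    have hlast : (PySem.List.pyGet? s (-1)).getD 0 = pvSuf s (s.length - 1) := by
      rw [PySem.List.pyGet?_neg_one, List.getLast?_eq_getElem?]
      rw [pvSuf_succ s (s.length - 1) (by omega)]
      rw [pvSuf_of_ge s (s.length - 1 + 1) (by omega), add_zero,
        List.getD_eq_getElem?_getD]
    have hsplit : ((List.range' 0 s.length).map (pvSuf s)).sum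
        = pvRun s 0 + pvSuf s (s.length - 1) := by
      have hc : s.length = (s.length - 1) + 1 := by omega
      have : List.range' 0 s.length = List.range' 0 (s.length - 1) ++ [s.length - 1] := by
        rw [hc]; simpa using (List.range'_concat (s := 0) (n := s.length - 1) (step := 1))
      rw [this]
      simp [pvRun]
    rw [hfold, hlast, ← sum_suf_eq_ws, hsplit]
    ring


-- ===== tightness: A ≠ B everywhere inside D_ =====

lemma pyGetD_nat_cast (s : List Int) (k : Nat) :
    (PySem.List.pyGet? s (k : Int)).getD 0 = s.getD k 0 := by
  rw [PySem.List.pyGet?_natCast, ← List.getD_eq_getElem?_getD]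

lemma pyGetD_nat_cast_succ (s : List Int) (k : Nat) :
    (PySem.List.pyGet? s ((k : Int) + 1)).getD 0 = s.getD (k + 1) 0 := by
  have hc : ((k : Int) + 1) = ((k + 1 : Nat) : Int) := by push_cast; ring
  rw [hc, PySem.List.pyGet?_natCast, ← List.getD_eq_getElem?_getD]

lemma getD_sub_suf (s : List Int) (k : Nat) (h : k < s.length) :
    s.getD k 0 = pvSuf s k - pvSuf s (k + 1) := by
  have := pvSuf_succ s k h
  linarith

lemma sum_map_sub_const (l : List Nat) (f : Nat → Int) (S : Int) :
    (l.map (fun k => f k - S)).sum = (l.map f).sum - l.length * S := by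
  induction l with
  | nil => simp
  | cons a t ih =>
    simp only [List.map_cons, List.sum_cons, List.length_cons, ih]
    push_cast
    ring

lemma sum_neg_of_forall_neg (l : List Int) (hne : l ≠ []) (h : ∀ x ∈ l, x < 0) :
    l.sum < 0 := by
  induction l with
  | nil => exact absurd rfl hne
  | cons a t ih =>
    rcases t with _ | ⟨b, u⟩
    · simpa using h a (by simp)
    · have ht := ih (by simp) (fun x hx => h x (List.mem_cons_of_mem a hx))
      have ha := h a (by simp)
      simp only [List.sum_cons] at ht ⊢
      linarith

lemma sum_nonpos_of_forall_nonpos (l : List Int) (h : ∀ x ∈ l, x ≤ 0) : l.sum ≤ 0 := by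
  induction l with
  | nil => simp
  | cons a t ih =>
    have ht := ih (fun x hx => h x (List.mem_cons_of_mem a hx))
    have ha := h a (by simp)
    simp only [List.sum_cons]
    linarith

-- splitting a suffix sum at an intermediate index
lemma pvSuf_seg (s : List Int) (a b : Nat) (hab : a ≤ b) :
    pvSuf s a = ((s.drop a).take (b - a)).sum + pvSuf s b := by
  unfold pvSuf
  have hsplit : s.drop a = (s.drop a).take (b - a) ++ (s.drop a).drop (b - a) :=
    (List.take_append_drop _ _).symm
  have hdd : (s.drop a).drop (b - a) = s.drop b := by
    rw [List.drop_drop]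
    congr 1
    omega
  calc (s.drop a).sum = ((s.drop a).take (b - a) ++ (s.drop a).drop (b - a)).sum := by
        rw [← hsplit]
    _ = ((s.drop a).take (b - a)).sum + ((s.drop a).drop (b - a)).sum := by
        rw [List.sum_append]
    _ = ((s.drop a).take (b - a)).sum + (s.drop b).sum := by rw [hdd]

-- downward propagation: below an index with all-negative entries, suffix sums stay < S
lemma suf_desc (s : List Int) (c : Nat) (S : Int) (hclen : c < s.length)
    (hc : pvSuf s c < S) (hneg : ∀ j, j < c → s.getD j 0 < 0) :
    ∀ k, k ≤ c → pvSuf s k < S := by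
  have aux : ∀ d k, k + d = c → pvSuf s k < S := by
    intro d
    induction d with
    | zero => intro k hk; rw [Nat.add_zero] at hk; exact hk ▸ hc
    | succ e ih =>
      intro k hk
      have hkc : k < c := by omega
      have hk1 : k < s.length := by omega
      rw [pvSuf_succ s k hk1]
      have h1 := hneg k hkc
      have h2 := ih (k + 1) (by omega)
      linarith
  intro k hk
  exact aux (c - k) k (by omega)

-- the core bound: at the first harmful firing index c (running total 0, remaining
-- suffix sum S ≠ 0), every earlier suffix sum of the sorted array is strictly below S
lemma diverge_bound (s : List Int) (c : Nat)
    (hmono : ∀ p q : Nat, p ≤ q → q < s.length → s.getD p 0 ≤ s.getD q 0)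
    (hc1 : 1 ≤ c) (hc2 : c + 1 < s.length)
    (hQ : pvRun s c = 0) (hS : pvSuf s (c + 1) ≠ 0) :
    ∀ k, k ≤ c → pvSuf s k < pvSuf s (c + 1) := by
  set S := pvSuf s (c + 1) with hSdef
  rcases lt_or_gt_of_ne hS with hSneg | hSpos
  · -- S < 0: the top block sums negative, so its least element s[c+1] is negative
    have htop : s.getD (c + 1) 0 < 0 := by
      by_contra hge
      push_neg at hge
      have : (0 : Int) ≤ S := by
        rw [hSdef]
        unfold pvSuf
        apply List.sum_nonneg
        intro x hx
        obtain ⟨j, hj, hxj⟩ := List.mem_iff_getElem.mp hx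
        have hjl : c + 1 + j < s.length := by
          have := List.length_drop (l := s) (i := c + 1) ▸ hj
          omega
        have hx' : x = s.getD (c + 1 + j) 0 := by
          rw [← hxj, List.getElem_drop, List.getD_eq_getElem?_getD,
            List.getElem?_eq_getElem hjl, Option.getD_some]
        rw [hx']
        exact le_trans hge (hmono (c + 1) (c + 1 + j) (by omega) hjl)
      omega
    have hnegj : ∀ j, j < c → s.getD j 0 < 0 := fun j hj =>
      lt_of_le_of_lt (hmono j (c + 1) (by omega) hc2) htop
    have hsc : pvSuf s c < S := by
      rw [pvSuf_succ s c (by omega), ← hSdef]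
      have := lt_of_le_of_lt (hmono c (c + 1) (by omega) hc2) htop
      linarith
    exact suf_desc s c S (by omega) hsc hnegj
  · -- 0 < S: every suffix sum from c+1 on is nonnegative
    have K2 : ∀ m, c + 1 ≤ m → 0 ≤ pvSuf s m := by
      by_contra hbad
      push_neg at hbad
      obtain ⟨m, hm1, hm2⟩ := hbad
      have hmn : m < s.length := by
        by_contra hge
        push_neg at hge
        rw [pvSuf_of_ge s m hge] at hm2
        omega
      set P : Nat → Prop := fun m => c + 1 ≤ m ∧ pvSuf s m < 0 with hPdef
      have hPm : P m := ⟨hm1, hm2⟩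
      set k0 := Nat.findGreatest P s.length with hk0def
      have hPk0 : P k0 := Nat.findGreatest_spec (le_of_lt hmn) hPm
      have hk0n : k0 < s.length := by
        by_contra hge
        push_neg at hge
        have := pvSuf_of_ge s k0 hge
        have := hPk0.2
        omega
      have hk0suc : 0 ≤ pvSuf s (k0 + 1) := by
        by_cases hin : k0 + 1 ≤ s.length
        · by_contra hlt
          push_neg at hlt
          have hnP : ¬ P (k0 + 1) :=
            Nat.findGreatest_is_greatest (k := k0 + 1) (by omega) hin
          exact hnP ⟨by omega, hlt⟩
        · rw [pvSuf_of_ge s (k0 + 1) (by omega)]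
      have hsk0 : s.getD k0 0 < 0 := by
        rw [getD_sub_suf s k0 hk0n]
        have := hPk0.2
        linarith
      have hseg := pvSuf_seg s (c + 1) k0 hPk0.1
      have htake : ((s.drop (c + 1)).take (k0 - (c + 1))).sum ≤ 0 := by
        apply sum_nonpos_of_forall_nonpos
        intro x hx
        obtain ⟨j, hj, hxj⟩ := List.mem_iff_getElem.mp hx
        have hjlt : j < k0 - (c + 1) := by
          have h1 := List.length_take_le (k0 - (c + 1)) (s.drop (c + 1))
          omega
        have hjl : c + 1 + j < s.length := by omega
        have hx' : x = s.getD (c + 1 + j) 0 := by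
          rw [← hxj, List.getElem_take, List.getElem_drop, List.getD_eq_getElem?_getD,
            List.getElem?_eq_getElem hjl, Option.getD_some]
        rw [hx']
        exact le_of_lt (lt_of_le_of_lt (hmono (c + 1 + j) k0 (by omega) hk0n) hsk0)
      have : S < 0 := by
        rw [hSdef]
        rw [hseg]
        have := hPk0.2
        linarith
      omega
    have hQ1 : 0 ≤ pvRun s (c + 1) := by
      unfold pvRun
      apply List.sum_nonneg
      intro x hx
      obtain ⟨k, hk, hxk⟩ := List.mem_map.mp hx
      rw [List.mem_range'_1] at hk
      rw [← hxk]
      exact K2 k hk.1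
    have hsc : pvSuf s c ≤ 0 := by
      have := pvRun_succ s c (by omega)
      rw [hQ] at this
      linarith
    have hscS : pvSuf s c < S := lt_of_le_of_lt hsc hSpos
    have hnegj : ∀ j, j < c → s.getD j 0 < 0 := by
      intro j hj
      have hgc : s.getD c 0 < 0 := by
        rw [getD_sub_suf s c (by omega)]
        rw [← hSdef]
        linarith
      exact lt_of_le_of_lt (hmono j c (by omega) (by omega)) hgc
    exact suf_desc s c S (by omega) hscS hnegj

-- actual running total of A after the firing: sum of (pvSuf k - S) for k = c .. cs-1
def pvP (s : List Int) (S : Int) (cs c : Nat) : Int :=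
  ((List.range' c (cs - c)).map (fun k => pvSuf s k - S)).sum

lemma pvP_cons (s : List Int) (S : Int) (cs c : Nat) (h : c < cs) :
    pvP s S cs c = (pvSuf s c - S) + pvP s S cs (c + 1) := by
  unfold pvP
  have hc : cs - c = (cs - (c + 1)) + 1 := by omega
  rw [hc, List.range'_succ]
  simp

-- the diverged phase: once last_penalty runs S below the intended value and every
-- remaining term is negative, the loop runs the else-branch to the end
lemma loop_div (s : List Int) (S : Int) (cs : Nat) (hlen : cs ≤ s.length - 1)
    (hterm : ∀ k, k < cs → pvSuf s k - S < 0) :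
    ∀ c, c < cs → ∀ p last, p = pvP s S cs c → last = pvSuf s c - S →
      getTotalTimeLoop s c p last = pvP s S cs 0 := by
  intro c
  induction c with
  | zero => intro _ p last hp _; simpa [getTotalTimeLoop] using hp
  | succ d ih =>
    intro hc p last hp hlast
    have hpneg : p < 0 := by
      rw [hp]
      apply sum_neg_of_forall_neg
      · have : cs - (d + 1) ≠ 0 := by omega
        simp [List.range'_eq_nil_iff, this]
      · intro x hx
        obtain ⟨k, hk, hxk⟩ := List.mem_map.mp hx
        rw [List.mem_range'_1] at hk
        rw [← hxk]
        exact hterm k (by omega)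
    rw [getTotalTimeLoop]
    simp only [if_neg (by omega : ¬ p = 0), pyGetD_nat_cast]
    apply ih (by omega)
    · rw [hlast, hp, pvP_cons s S cs d (by omega), getD_sub_suf s d (by omega),
        pvSuf_succ s d (by omega)]
      ring
    · rw [hlast, getD_sub_suf s d (by omega), pvSuf_succ s d (by omega)]
      ring

-- the run from the top: clean (possibly with harmless firings) down to the first
-- harmful firing at cs, then diverged to the end
lemma loop_main (s : List Int) (cs : Nat) (hcs1 : 1 ≤ cs) (hlen : cs + 1 ≤ s.length - 1)
    (hfire : pvRun s cs = 0) (hS : pvSuf s (cs + 1) ≠ 0)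
    (hmax : ∀ j, cs < j → pvRun s j = 0 → pvSuf s (j + 1) = 0)
    (hterm : ∀ k, k < cs → pvSuf s k < pvSuf s (cs + 1)) :
    ∀ d, cs + d ≤ s.length - 1 → ∀ p last, p = pvRun s (cs + d) →
      (p ≠ 0 → last = pvSuf s (cs + d)) →
      getTotalTimeLoop s (cs + d) p last = pvP s (pvSuf s (cs + 1)) cs 0 := by
  intro d
  induction d with
  | zero =>
    intro _ p last hp _
    obtain ⟨m, rfl⟩ : ∃ m, cs = m + 1 := ⟨cs - 1, by omega⟩
    rw [Nat.add_zero] at hp ⊢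
    have hp0 : p = 0 := by rw [hp, hfire]
    rw [getTotalTimeLoop]
    simp only [hp0, reduceIte, pyGetD_nat_cast, pyGetD_nat_cast_succ]
    have hlp : s.getD (m + 1) 0 + s.getD m 0 = pvSuf s m - pvSuf s (m + 1 + 1) := by
      rw [getD_sub_suf s (m + 1) (by omega), getD_sub_suf s m (by omega)]
      ring
    rw [hlp]
    have hres := loop_div s (pvSuf s (m + 1 + 1)) (m + 1) (by omega)
      (fun k hk => by have := hterm k hk; linarith) m (by omega)
      (0 + (pvSuf s m - pvSuf s (m + 1 + 1))) (pvSuf s m - pvSuf s (m + 1 + 1))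
      (by rw [pvP_cons s _ (m + 1) m (by omega)]
          unfold pvP
          simp) rfl
    exact hres
  | succ e ih =>
    intro hd p last hp hlast
    have hc : cs + (e + 1) = (cs + e) + 1 := by omega
    rw [hc] at hp hlast ⊢
    have hi1 : cs + e + 1 < s.length := by omega
    have hi0 : cs + e < s.length := by omega
    rw [getTotalTimeLoop]
    have hstep : pvRun s (cs + e) = pvSuf s (cs + e) + pvRun s (cs + e + 1) :=
      pvRun_succ s (cs + e) (by omega)
    by_cases hz : p = 0
    · have hQ : pvRun s (cs + e + 1) = 0 := by rw [← hp, hz]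
      have hs2 : pvSuf s (cs + e + 2) = 0 := hmax (cs + e + 1) (by omega) hQ
      simp only [hz, reduceIte, pyGetD_nat_cast, pyGetD_nat_cast_succ]
      have hlp : s.getD (cs + e + 1) 0 + s.getD (cs + e) 0 = pvSuf s (cs + e) := by
        rw [getD_sub_suf s (cs + e + 1) hi1, getD_sub_suf s (cs + e) hi0]
        have : pvSuf s (cs + e + 1 + 1) = 0 := hs2
        linarith
      rw [hlp]
      apply ih (by omega)
      · rw [hstep, hQ]; ring
      · intro _; rfl
    · have hlast' : last = pvSuf s (cs + e + 1) := hlast hz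
      simp only [if_neg hz, pyGetD_nat_cast]
      have hlp : last + s.getD (cs + e) 0 = pvSuf s (cs + e) := by
        rw [hlast', getD_sub_suf s (cs + e) hi0]
        ring
      rw [hlp]
      apply ih (by omega)
      · rw [hp, hstep]; ring
      · intro _; rfl

-- ===== VERDICT (by name: the statement is the Claim_ definition above) =====
theorem getTotalTime_spec : Claim_unchanged_getTotalTime := by
  intro arr _ hD
  have hnot : ¬ ∃ i ∈ Finset.Icc 1 ((PySem.List.sorted arr (fun x => x)).length - 1),
      pvRun (PySem.List.sorted arr (fun x => x)) i = 0 ∧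
      pvSuf (PySem.List.sorted arr (fun x => x)) (i + 1) ≠ 0 := by
    intro hex
    exact hD ((pvScan_spec (PySem.List.sorted arr (fun x => x))).2.2.mpr hex)
  rw [A_eq_run arr, B_eq_run arr]
  intro j hj hQ
  by_cases hle : j ≤ (PySem.List.sorted arr (fun x => x)).length - 1
  · by_contra hne
    exact hnot ⟨j, Finset.mem_Icc.mpr ⟨hj, hle⟩, hQ, hne⟩
  · apply pvSuf_of_ge
    omega

theorem getTotalTime_changed : Claim_changed_getTotalTime := by
  unfold Claim_changed_getTotalTime; decide

theorem getTotalTime_tight : Claim_exact_getTotalTime := by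
  intro arr hdom hDarr heq
  unfold D_getTotalTime at hDarr
  set s := PySem.List.sorted arr (fun x => x) with hs
  obtain ⟨i, hiIcc, hQi, hSi⟩ := (pvScan_spec s).2.2.mp hDarr
  rw [Finset.mem_Icc] at hiIcc
  have hlenA : s.length = arr.length := PySem.List.length_sorted ..
  set P : Nat → Prop := fun m => pvRun s m = 0 ∧ pvSuf s (m + 1) ≠ 0 with hPdef
  set cs := Nat.findGreatest P s.length with hcsdef
  have hn2 : 2 ≤ s.length := by
    by_contra h
    push_neg at h
    exact hSi (pvSuf_of_ge s (i + 1) (by omega))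
  have hin : i ≤ s.length := by omega
  have hPi : P i := ⟨hQi, hSi⟩
  have hPcs : P cs := Nat.findGreatest_spec hin hPi
  have hcs1 : 1 ≤ cs := le_trans hiIcc.1 (Nat.le_findGreatest hin hPi)
  have hcsn : cs + 1 < s.length := by
    by_contra h
    push_neg at h
    exact hPcs.2 (pvSuf_of_ge s (cs + 1) (by omega))
  have hmax : ∀ j, cs < j → pvRun s j = 0 → pvSuf s (j + 1) = 0 := by
    intro j hj hQj
    by_cases hjn : j ≤ s.length
    · by_contra hne
      exact Nat.findGreatest_is_greatest (k := j) hj hjn ⟨hQj, hne⟩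
    · exact pvSuf_of_ge s (j + 1) (by omega)
  have hmono : ∀ p q : Nat, p ≤ q → q < s.length → s.getD p 0 ≤ s.getD q 0 := by
    intro p q hpq hq
    have hp : p < s.length := by omega
    rw [List.getD_eq_getElem?_getD, List.getD_eq_getElem?_getD,
      List.getElem?_eq_getElem hp, List.getElem?_eq_getElem hq]
    simp only [Option.getD_some]
    exact PySem.List.sorted_id_getElem_mono arr hpq (hs ▸ hq)
  have hterm := diverge_bound s cs hmono hcs1 hcsn hPcs.1 hPcs.2
  have hA : getTotalTime arr = pvP s (pvSuf s (cs + 1)) cs 0 := by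
    have hA0 : getTotalTime arr
        = getTotalTimeLoop s (arr.length - 1) 0 0 := rfl
    rw [hA0]
    have hd : arr.length - 1 = cs + (s.length - 1 - cs) := by omega
    rw [hd]
    apply loop_main s cs hcs1 (by omega) hPcs.1 hPcs.2 hmax
      (fun k hk => hterm k (le_of_lt hk)) (s.length - 1 - cs) (by omega)
    · rw [pvRun_top s _ (by omega)]
    · intro h; exact absurd rfl h
  have hB : getTotalTime_alt arr = pvRun s 0 := B_eq_run arr
  have hsplit : pvRun s 0 = ((List.range' 0 cs).map (pvSuf s)).sum + pvRun s cs := by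
    unfold pvRun
    have happ : List.range' 0 cs ++ List.range' cs (s.length - 1 - cs)
        = List.range' 0 (s.length - 1) := by
      have h0 := List.range'_append (s := 0) (m := cs) (n := s.length - 1 - cs) (step := 1)
      have h1 : 0 + 1 * cs = cs := by omega
      have h2 : cs + (s.length - 1 - cs) = s.length - 1 := by omega
      rw [h1] at h0
      rw [h0, h2]
    rw [Nat.sub_zero, ← happ, List.map_append, List.sum_append]
  have hP0 : pvP s (pvSuf s (cs + 1)) cs 0
      = ((List.range' 0 cs).map (pvSuf s)).sum - cs * pvSuf s (cs + 1) := by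
    unfold pvP
    rw [Nat.sub_zero, sum_map_sub_const]
    rw [List.length_range']
  rw [hA, hB, hsplit, hP0, hPcs.1, add_zero] at heq
  have hz : (cs : Int) * pvSuf s (cs + 1) = 0 := by linarith
  rcases mul_eq_zero.mp hz with h | h
  · have : cs = 0 := by exact_mod_cast h
    omega
  · exact hPcs.2 h
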